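-- pv_equiv track=rewrite | github.com/G0LDF0X/Python-Coding-Test-Study | chanmi/0812_PGM_할인 행사.py | solution
-- ===== SOURCE A (Python) =====
-- def solution(want, number, discount):
--     fruit_dict = {}
--     count = 0
--     for i in range(len(want)):
--         fruit_dict[want[i]] = number[i]
--
--     for i in range(len(discount) - 9):
--         is_same = True
--         check_list = discount[i:i+10]
--         for fruit in want:
--             if check_list.count(fruit) == fruit_dict[fruit]:
--                 continue
--             else:
--                 is_same = False
--
--         if is_same:
--             count += 1
--     return count
-- ===== SOURCE B (Python) =====
-- def _adjust(cnt, need, matched, fruit, delta):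
--     """Add delta to cnt[fruit] if it is tracked, keeping matched = #fruits with cnt == need."""
--     if fruit in cnt:
--         if cnt[fruit] == need[fruit]:
--             matched -= 1
--         cnt[fruit] += delta
--         if cnt[fruit] == need[fruit]:
--             matched += 1
--     return matched
--
--
-- def solution(want, number, discount):
--     need = dict(zip(want, number))
--     k = len(need)
--     cnt = dict.fromkeys(need, 0)
--     matched = sum(1 for v in need.values() if v == 0)
--     total = 0
--     for j, item in enumerate(discount):
--         matched = _adjust(cnt, need, matched, item, 1)
--         if j >= 10:
--             matched = _adjust(cnt, need, matched, discount[j - 10], -1)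
--         if j >= 9 and matched == k:
--             total += 1
--     return total
-- ===== Notes on version B (the rewrite author's own statement) =====
-- stated objective: faster
-- what changed: Replaces A's per-window slicing and per-fruit window rescans with a single sliding-window pass that maintains per-fruit counters and a running count of currently satisfied fruits, updated per element via a shared _adjust helper.
import Mathlib
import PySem

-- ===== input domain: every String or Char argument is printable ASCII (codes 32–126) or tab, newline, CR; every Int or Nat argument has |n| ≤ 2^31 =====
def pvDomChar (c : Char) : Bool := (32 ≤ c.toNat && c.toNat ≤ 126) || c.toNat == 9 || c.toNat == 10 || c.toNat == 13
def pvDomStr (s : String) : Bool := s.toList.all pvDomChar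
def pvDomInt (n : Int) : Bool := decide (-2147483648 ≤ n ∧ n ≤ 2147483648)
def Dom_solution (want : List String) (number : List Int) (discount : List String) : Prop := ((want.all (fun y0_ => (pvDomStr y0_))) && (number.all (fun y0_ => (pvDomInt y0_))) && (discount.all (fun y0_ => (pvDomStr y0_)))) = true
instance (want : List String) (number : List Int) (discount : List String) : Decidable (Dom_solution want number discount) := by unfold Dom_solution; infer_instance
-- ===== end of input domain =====

-- B replaces A's per-window slice + per-fruit rescan with one sliding-window pass keeping per-fruit counters
-- and a counter of currently satisfied fruits (objective: faster).

-- ===== PORT A =====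
def solution (want : List String) (number : List Int) (discount : List String) : Int :=
  let fruit_dict : PySem.Dict String Int :=
    (PySem.List.pyRange 0 (want.length : Int) 1).foldl
      (fun d i => d.insert (PySem.List.pyGetD want i "") (PySem.List.pyGetD number i 0))
      PySem.Dict.empty
  (PySem.List.pyRange 0 ((discount.length : Int) - 9) 1).foldl
    (fun count i =>
      let check_list := PySem.List.slice discount (some i) (some (i + 10))
      let is_same := want.foldl
        (fun b fruit =>
          if (PySem.List.count check_list fruit : Int) = fruit_dict.getD fruit 0 then b else false)
        true
      if is_same then count + 1 else count)
    0

-- ===== PORT B =====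
-- helper _adjust: add delta to cnt[fruit] if tracked, keeping matched = #fruits with cnt == need
def solutionAltAdjust (cnt need : PySem.Dict String Int) (matched : Int) (fruit : String)
    (delta : Int) : PySem.Dict String Int × Int :=
  if cnt.contains fruit then
    let m1 := if cnt.getD fruit 0 = need.getD fruit 0 then matched - 1 else matched
    let c1 := cnt.insert fruit (cnt.getD fruit 0 + delta)
    let m2 := if c1.getD fruit 0 = need.getD fruit 0 then m1 + 1 else m1
    (c1, m2)
  else (cnt, matched)

-- one iteration of B's loop; state ((cnt, matched), total), ji = (index, item)
def solutionAltStep (need : PySem.Dict String Int) (k : Int) (discount : List String)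
    (st : (PySem.Dict String Int × Int) × Int) (ji : Int × String) :
    (PySem.Dict String Int × Int) × Int :=
  let p1 := solutionAltAdjust st.1.1 need st.1.2 ji.2 1
  let p2 := if 10 ≤ ji.1 then
      solutionAltAdjust p1.1 need p1.2 (PySem.List.pyGetD discount (ji.1 - 10) "") (-1)
    else p1
  let total := if 9 ≤ ji.1 ∧ p2.2 = k then st.2 + 1 else st.2
  (p2, total)

def solution_alt (want : List String) (number : List Int) (discount : List String) : Int :=
  let need : PySem.Dict String Int :=
    (want.zip number).foldl (fun d p => d.insert p.1 p.2) PySem.Dict.empty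
  let k : Int := need.size
  let cnt : PySem.Dict String Int :=
    need.keys.foldl (fun d f => d.insert f (0 : Int)) PySem.Dict.empty
  let matched : Int := need.values.foldl (fun m v => if v = 0 then m + 1 else m) 0
  ((PySem.List.enumerate discount 0).foldl (solutionAltStep need k discount) ((cnt, matched), 0)).2

-- ===== PRECONDITION & SPEC =====
-- Pre_ excludes exactly the inputs where A raises IndexError (number shorter than want).
def Pre_solution (want : List String) (number : List Int) (discount : List String) : Prop :=
  want.length ≤ number.length
instance (want : List String) (number : List Int) (discount : List String) : Decidable (Pre_solution want number discount) := by unfold Pre_solution; infer_instance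

def pvWitness_solution : List String × List Int × List String :=
  (["a", "b"], [2, 1], ["a", "a", "b", "x", "x", "x", "x", "x", "x", "x", "a"])

def Spec_solution (want : List String) (number : List Int) (discount : List String) (out : Int) : Prop := out = solution_alt want number discount
instance (want : List String) (number : List Int) (discount : List String) (out : Int) : Decidable (Spec_solution want number discount out) := by unfold Spec_solution; infer_instance

-- ===== CLAIM (what is proved, stated in full; the proofs are below) =====
def Claim_equal_solution : Prop := ∀ (want : List String) (number : List Int) (discount : List String), Dom_solution want number discount → Pre_solution want number discount → Spec_solution want number discount (solution want number discount)

-- ===== LEMMAS AND PROOFS =====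

-- L2: A's inner is_same fold
theorem foldl_ite_false {α : Type} (p : α → Prop) [DecidablePred p] (l : List α) :
    ∀ b : Bool, l.foldl (fun b x => if p x then b else false) b = (b && l.all fun x => decide (p x)) := by
  induction l with
  | nil => intro b; simp
  | cons a l ih =>
    intro b
    simp only [List.foldl_cons, List.all_cons, ih]
    by_cases h : p a <;> simp [h]

-- L4: countP after touching one key
theorem countP_touch {α : Type} [DecidableEq α] (l : List α) (hn : l.Nodup) (a : α) (ha : a ∈ l)
    (p q : α → Bool) (h : ∀ x ∈ l, x ≠ a → p x = q x) :
    (l.countP q : Int) = (l.countP p : Int) - (if p a then 1 else 0) + (if q a then 1 else 0) := by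
  obtain ⟨s, t, rfl⟩ := List.mem_iff_append.mp ha
  have hs : ∀ x ∈ s, p x = q x := by
    intro x hx
    refine h x (by simp [hx]) ?_
    rintro rfl
    exact (List.disjoint_of_nodup_append hn hx (by simp)).elim
  have hna : a ∉ t := by
    have := List.nodup_append.mp hn
    simpa using (List.nodup_cons.mp this.2.1).1
  have ht : ∀ x ∈ t, p x = q x := by
    intro x hx
    refine h x (by simp [hx]) ?_
    rintro rfl
    exact hna hx
  have hcs : s.countP p = s.countP q := List.countP_congr (fun x hx => by simp [hs x hx])
  have hct : t.countP p = t.countP q := List.countP_congr (fun x hx => by simp [ht x hx])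
  rw [List.countP_append, List.countP_append, List.countP_cons, List.countP_cons, hcs, hct]
  split_ifs <;> push_cast <;> omega

-- cnt0 lookup
theorem getD_foldl_insert_zero (l : List String) :
    ∀ (d : PySem.Dict String Int) (x : String),
    (l.foldl (fun d f => d.insert f (0 : Int)) d).getD x 0 = if x ∈ l then 0 else d.getD x 0 := by
  induction l with
  | nil => intro d x; simp
  | cons a l ih =>
    intro d x
    simp only [List.foldl_cons, ih]
    by_cases hx : x ∈ l
    · simp [hx]
    · by_cases hxa : x = a <;> simp [hx, hxa, PySem.Dict.getD_insert]

-- Nat-level version of A's dict-building loop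
theorem natFold_eq_zip : ∀ (want : List String) (number : List Int),
    want.length ≤ number.length → ∀ (d : PySem.Dict String Int),
    (List.range want.length).foldl (fun d k => d.insert (want.getD k "") (number.getD k 0)) d
    = (want.zip number).foldl (fun d p => d.insert p.1 p.2) d := by
  intro want
  induction want with
  | nil => intro number _ d; simp
  | cons w ws ih =>
    intro number hlen d
    match number with
    | [] => simp at hlen
    | x :: xs =>
      simp only [List.length_cons, List.range_succ_eq_map, List.foldl_cons, List.foldl_map,
        List.getD_cons_succ, List.getD_cons_zero, List.zip_cons_cons]
      exact ih xs (by simpa using hlen) (d.insert w x)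

-- bridge: a foldl over pyRange 0 n 1 is a foldl over List.range n
theorem foldl_pyRange_eq_range {α : Type} (n : Nat) (g : α → Int → α) (d : α) :
    (PySem.List.pyRange 0 (n : Int) 1).foldl g d = (List.range n).foldl (fun d (k : Nat) => g d ((k : Nat) : Int)) d := by
  rw [PySem.List.pyRange_one, List.foldl_map]
  have h : ((n : Int) - 0).toNat = n := by omega
  rw [h]
  simp only [zero_add]

-- A's dict-building loop equals the zip fold
theorem dictA_eq (want : List String) (number : List Int)
    (hlen : want.length ≤ number.length) (d : PySem.Dict String Int) :
    (PySem.List.pyRange 0 (want.length : Int) 1).foldl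
      (fun d i => d.insert (PySem.List.pyGetD want i "") (PySem.List.pyGetD number i 0)) d
    = (want.zip number).foldl (fun d p => d.insert p.1 p.2) d := by
  rw [foldl_pyRange_eq_range]
  rw [← natFold_eq_zip want number hlen d]
  simp only [PySem.List.pyGetD_natCast, List.getD]

def wcnt (discount : List String) (m : Nat) (f : String) : Int :=
  ((discount.take m).count f : Int) - ((discount.take (m - 10)).count f : Int)

def okW (need : PySem.Dict String Int) (discount : List String) (i : Nat) : Bool :=
  need.keys.all (fun f => (((discount.drop i).take 10).count f : Int) == need.getD f 0)

theorem wcnt_zero (discount : List String) (f : String) : wcnt discount 0 f = 0 := by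
  simp [wcnt]

theorem count_take_succ (l : List String) (m : Nat) (h : m < l.length) (f : String) :
    (l.take (m+1)).count f = (l.take m).count f + (if l[m] = f then 1 else 0) := by
  rw [List.take_add_one, List.count_append]
  simp only [List.getElem?_eq_getElem h, Option.toList_some]
  by_cases hf : l[m] = f <;> simp [hf]


theorem wcnt_succ (discount : List String) (m : Nat) (h : m < discount.length) (f : String) :
    wcnt discount (m+1) f = wcnt discount m f + (if discount[m] = f then 1 else 0)
      - (if h10 : 10 ≤ m then (if discount[m-10]'(by omega) = f then 1 else 0) else 0) := by
  unfold wcnt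
  rw [count_take_succ discount m h f]
  by_cases h10 : 10 ≤ m
  · have h1 : m + 1 - 10 = (m - 10) + 1 := by omega
    rw [h1, count_take_succ discount (m-10) (by omega) f]
    simp [h10]
    ring_nf
  · have h1 : m + 1 - 10 = 0 := by omega
    have h2 : m - 10 = 0 := by omega
    rw [h1]
    simp only [h2, dif_neg h10]
    push_cast
    split_ifs <;> omega

theorem wcnt_window (discount : List String) (m : Nat) (h9 : 9 ≤ m) (f : String) :
    wcnt discount (m+1) f = (((discount.drop (m-9)).take 10).count f : Int) := by
  unfold wcnt
  have h1 : m + 1 - 10 = m - 9 := by omega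
  have h2 : m + 1 = (m - 9) + 10 := by omega
  rw [h1, h2, List.take_add, List.count_append]
  push_cast
  ring

-- effect of one _adjust call on the invariant
theorem adjust_spec (need : PySem.Dict String Int) (hnd : need.keys.Nodup)
    (c : PySem.Dict String Int) (mt : Int) (x : String) (g : String → Int) (δ : Int)
    (hk : c.keys = need.keys)
    (hc : ∀ f ∈ need.keys, c.getD f 0 = g f)
    (hmt : mt = ((need.keys.countP fun f => decide (g f = need.getD f 0)) : Int)) :
    (solutionAltAdjust c need mt x δ).1.keys = need.keys ∧
    (∀ f ∈ need.keys,
      (solutionAltAdjust c need mt x δ).1.getD f 0 = g f + (if x = f then δ else 0)) ∧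
    (solutionAltAdjust c need mt x δ).2
      = ((need.keys.countP fun f => decide (g f + (if x = f then δ else 0) = need.getD f 0)) : Int) := by
  by_cases hx : x ∈ need.keys
  · have hcont : c.contains x = true := (PySem.Dict.contains_iff_mem_keys c x).mpr (hk ▸ hx)
    unfold solutionAltAdjust
    simp only [hcont, if_true]
    have hkeys : (c.insert x (c.getD x 0 + δ)).keys = c.keys :=
      PySem.Dict.keys_insert_of_contains c (c.getD x 0 + δ) hcont
    have hgetd : ∀ f, (c.insert x (c.getD x 0 + δ)).getD f 0
        = if f = x then c.getD x 0 + δ else c.getD f 0 := by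
      intro f; exact PySem.Dict.getD_insert c x f (c.getD x 0 + δ) 0
    refine ⟨by rw [hkeys, hk], ?_, ?_⟩
    · intro f hf
      rw [hgetd f]
      by_cases hfx : f = x
      · subst hfx; simp [hc f hf]
      · rw [if_neg hfx, if_neg (Ne.symm hfx), hc f hf, add_zero]
    · have htouch := countP_touch need.keys hnd x hx
        (fun f => decide (g f = need.getD f 0))
        (fun f => decide (g f + (if x = f then δ else 0) = need.getD f 0))
        (fun f _ hfx => by simp only [if_neg (Ne.symm hfx), add_zero])
      rw [htouch, ← hmt, hgetd x, if_pos rfl, hc x hx]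
      split_ifs <;> simp_all
  · have hcont : c.contains x = false := by
      rw [← Bool.not_eq_true, PySem.Dict.contains_iff_mem_keys c x, hk]
      exact hx
    unfold solutionAltAdjust
    simp only [hcont, Bool.false_eq_true, if_false]
    refine ⟨hk, ?_, ?_⟩
    · intro f hf
      have hne : x ≠ f := by rintro rfl; exact hx hf
      rw [if_neg hne, add_zero, hc f hf]
    · rw [hmt]
      congr 1
      refine List.countP_congr (fun f hf => ?_)
      have hne : x ≠ f := by rintro rfl; exact hx hf
      simp only [if_neg hne, add_zero]

-- the invariant carried through B's fold
def InvP (need : PySem.Dict String Int) (discount : List String) (m : Nat)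
    (st : (PySem.Dict String Int × Int) × Int) : Prop :=
  st.1.1.keys = need.keys ∧
  (∀ f ∈ need.keys, st.1.1.getD f 0 = wcnt discount m f) ∧
  st.1.2 = ((need.keys.countP fun f => decide (wcnt discount m f = need.getD f 0)) : Int) ∧
  st.2 = ((List.range (m - 9)).countP (okW need discount) : Int)

theorem inv_step (need : PySem.Dict String Int) (hnd : need.keys.Nodup)
    (discount : List String) (m : Nat) (hm : m < discount.length)
    (st : (PySem.Dict String Int × Int) × Int) (h : InvP need discount m st) :
    InvP need discount (m+1)
      (solutionAltStep need (need.keys.length : Int) discount st ((m : Int), discount[m])) := by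
  obtain ⟨⟨c, mt⟩, tl⟩ := st
  obtain ⟨hk, hc, hmt, htl⟩ := h
  dsimp only at hk hc hmt htl
  -- phase 1: add discount[m]
  have h1 := adjust_spec need hnd c mt discount[m] (wcnt discount m) 1 hk hc hmt
  obtain ⟨h1k, h1c, h1m⟩ := h1
  -- the counter function after phase 1
  set g1 : String → Int := fun f => wcnt discount m f + (if discount[m] = f then 1 else 0) with hg1
  -- phase 2: remove discount[m-10] when it exists
  have key2 : ∀ (h10 : 10 ≤ m), PySem.List.pyGetD discount ((m : Int) - 10) "" = discount[m-10]'(by omega) := by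
    intro h10
    have hcast : ((m : Int) - 10) = ((m - 10 : Nat) : Int) := by omega
    rw [hcast, PySem.List.pyGetD_natCast]
    simp [List.getD, List.getElem?_eq_getElem (show m - 10 < discount.length by omega)]
  -- final counter function
  have hfinal : ∀ st2 : PySem.Dict String Int × Int,
      st2.1.keys = need.keys →
      (∀ f ∈ need.keys, st2.1.getD f 0 = wcnt discount (m+1) f) →
      st2.2 = ((need.keys.countP fun f => decide (wcnt discount (m+1) f = need.getD f 0)) : Int) →
      InvP need discount (m+1)
        ((st2, if 9 ≤ (m : Int) ∧ st2.2 = (need.keys.length : Int) then tl + 1 else tl)) := by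
    intro st2 hk2 hc2 hm2
    refine ⟨hk2, hc2, hm2, ?_⟩
    by_cases h9 : 9 ≤ m
    · have h9' : (9 : Int) ≤ (m : Int) := by exact_mod_cast h9
      have hr : (m + 1) - 9 = (m - 9) + 1 := by omega
      have hiff : st2.2 = (need.keys.length : Int) ↔ okW need discount (m - 9) = true := by
        rw [hm2, Int.natCast_inj, List.countP_eq_length]
        simp only [okW, List.all_eq_true, beq_iff_eq, decide_eq_true_eq]
        refine forall₂_congr (fun f hf => ?_)
        rw [wcnt_window discount m h9 f]
      dsimp only
      rw [hr, List.range_succ, List.countP_append, htl]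
      by_cases hok : okW need discount (m - 9) = true
      · rw [if_pos ⟨h9', hiff.mpr hok⟩]
        simp [hok]
      · rw [if_neg (fun hand => hok (hiff.mp hand.2))]
        simp [hok]
    · have h9' : ¬ (9 : Int) ≤ (m : Int) := by exact_mod_cast h9
      have hr : (m + 1) - 9 = 0 := by omega
      have hr2 : m - 9 = 0 := by omega
      rw [if_neg (fun hand => h9' hand.1), htl, hr, hr2]
  -- now compute the step
  unfold solutionAltStep
  dsimp only
  by_cases h10 : 10 ≤ m
  · have h10' : (10 : Int) ≤ (m : Int) := by exact_mod_cast h10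
    rw [if_pos h10', key2 h10]
    have h2 := adjust_spec need hnd _ _ (discount[m-10]'(by omega)) g1 (-1) h1k h1c h1m
    obtain ⟨h2k, h2c, h2m⟩ := h2
    refine hfinal _ h2k ?_ ?_
    · intro f hf
      rw [h2c f hf, wcnt_succ discount m hm f, dif_pos h10]
      simp only [hg1]
      split_ifs <;> omega
    · rw [h2m]
      congr 1
      refine List.countP_congr (fun f hf => ?_)
      have : g1 f + (if discount[m-10]'(by omega) = f then (-1:Int) else 0)
          = wcnt discount (m+1) f := by
        rw [wcnt_succ discount m hm f, dif_pos h10]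
        simp only [hg1]
        split_ifs <;> omega
      simp only [this]
  · have h10' : ¬ (10 : Int) ≤ (m : Int) := by exact_mod_cast h10
    rw [if_neg h10']
    refine hfinal _ h1k ?_ ?_
    · intro f hf
      rw [h1c f hf, wcnt_succ discount m hm f, dif_neg h10]
      ring
    · rw [h1m]
      congr 1
      refine List.countP_congr (fun f hf => ?_)
      have : wcnt discount m f + (if discount[m] = f then (1:Int) else 0)
          = wcnt discount (m+1) f := by
        rw [wcnt_succ discount m hm f, dif_neg h10]
        ring
      simp only [this]

theorem enumerate_take_succ (discount : List String) (m : Nat) (hm : m < discount.length) :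
    (PySem.List.enumerate discount 0).take (m+1)
    = (PySem.List.enumerate discount 0).take m ++ [((m : Int), discount[m])] := by
  rw [List.take_add_one]
  congr 1
  rw [PySem.List.getElem?_enumerate, List.getElem?_eq_getElem hm]
  simp

theorem inv_all (need : PySem.Dict String Int) (hnd : need.keys.Nodup) (discount : List String)
    (st0 : (PySem.Dict String Int × Int) × Int) (h0 : InvP need discount 0 st0) :
    ∀ m, m ≤ discount.length →
      InvP need discount m
        (((PySem.List.enumerate discount 0).take m).foldl
          (solutionAltStep need (need.keys.length : Int) discount) st0) := by
  intro m
  induction m with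
  | zero => intro _; simpa using h0
  | succ m ih =>
    intro hm
    rw [enumerate_take_succ discount m (by omega), List.foldl_append]
    exact inv_step need hnd discount m (by omega) _ (ih (by omega))

theorem invP_zero (need : PySem.Dict String Int) (hnd : need.keys.Nodup) (discount : List String) :
    InvP need discount 0
      ((need.keys.foldl (fun d f => d.insert f (0 : Int)) PySem.Dict.empty,
        need.values.foldl (fun m v => if v = 0 then m + 1 else m) 0), 0) := by
  refine ⟨?_, ?_, ?_, by simp⟩
  · have := PySem.Dict.keys_foldl_insert need.keys (fun _ _ => (0 : Int)) PySem.Dict.empty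
    rw [this]
    simp [PySem.Set.update_nil_left, PySem.Set.ofList_eq_self_of_nodup need.keys hnd]
  · intro f hf
    rw [getD_foldl_insert_zero need.keys PySem.Dict.empty f, if_pos hf, wcnt_zero]
  · rw [PySem.List.foldl_ite_add_one (fun v => v = 0) need.values 0,
      PySem.Dict.values_eq_map_keys need hnd 0, List.countP_map]
    simp only [zero_add, Nat.cast_inj]
    refine List.countP_congr (fun f hf => ?_)
    simp [wcnt_zero, eq_comm]

-- the want→number dict both programs build
def needD (want : List String) (number : List Int) : PySem.Dict String Int :=
  (want.zip number).foldl (fun d p => d.insert p.1 p.2) PySem.Dict.empty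

theorem nodup_needD (want : List String) (number : List Int) : (needD want number).keys.Nodup := by
  exact PySem.Dict.nodup_keys_foldl_insert_key (want.zip number) (fun p => p.1) (fun _ p => p.2)
    PySem.Dict.empty (by simp [PySem.Dict.keys_empty])

theorem keys_needD (want : List String) (number : List Int) :
    (needD want number).keys = PySem.Set.ofList ((want.zip number).map (fun p => p.1)) := by
  unfold needD
  rw [PySem.Dict.keys_foldl_insert_key (want.zip number) (fun p => p.1) (fun _ p => p.2)
    PySem.Dict.empty]
  simp [PySem.Dict.keys_empty, PySem.Set.update_nil_left]

theorem mem_keys_needD (want : List String) (number : List Int)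
    (hlen : want.length ≤ number.length) (f : String) :
    f ∈ (needD want number).keys ↔ f ∈ want := by
  rw [keys_needD, PySem.Set.mem_ofList, List.map_fst_zip hlen]

theorem alt_eq (want : List String) (number : List Int) (discount : List String) :
    solution_alt want number discount
    = ((List.range (discount.length - 9)).countP (okW (needD want number) discount) : Int) := by
  unfold solution_alt
  dsimp only
  have hnd := nodup_needD want number
  have hsize : ((needD want number).size : Int) = ((needD want number).keys.length : Int) := by
    simp [PySem.Dict.size, PySem.Dict.keys]
  rw [show (want.zip number).foldl (fun d p => d.insert p.1 p.2) PySem.Dict.empty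
      = needD want number from rfl]
  rw [hsize]
  have henum : PySem.List.enumerate discount 0
      = (PySem.List.enumerate discount 0).take discount.length := by
    rw [← PySem.List.length_enumerate discount 0, List.take_length]
  rw [henum]
  exact (inv_all (needD want number) hnd discount _ (invP_zero (needD want number) hnd discount)
    discount.length (le_refl _)).2.2.2

theorem a_eq (want : List String) (number : List Int) (discount : List String)
    (hlen : want.length ≤ number.length) :
    solution want number discount
    = ((List.range (discount.length - 9)).countP (okW (needD want number) discount) : Int) := by
  unfold solution
  dsimp only
  rw [dictA_eq want number hlen PySem.Dict.empty]
  rw [show (want.zip number).foldl (fun d p => d.insert p.1 p.2) PySem.Dict.empty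
      = needD want number from rfl]
  by_cases h9 : 9 ≤ discount.length
  · have hcast : ((discount.length : Int) - 9) = ((discount.length - 9 : Nat) : Int) := by omega
    rw [hcast, foldl_pyRange_eq_range]
    rw [PySem.List.foldl_if_add_one
      (fun k : Nat => want.foldl (fun b fruit =>
        if (PySem.List.count (PySem.List.slice discount (some ((k : Nat) : Int))
            (some (((k : Nat) : Int) + 10))) fruit : Int) = (needD want number).getD fruit 0
        then b else false) true)
      (List.range (discount.length - 9)) 0]
    rw [zero_add, Int.natCast_inj]
    refine List.countP_congr (fun k hk => ?_)
    have hk' : k < discount.length - 9 := List.mem_range.mp hk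
    -- the slice is the window
    have hslice : PySem.List.slice discount (some ((k : Nat) : Int)) (some (((k : Nat) : Int) + 10))
        = (discount.drop k).take 10 := by
      have h10 : (((k : Nat) : Int) + 10) = (((k + 10 : Nat)) : Int) := by push_cast; ring
      rw [h10, PySem.List.slice_natCast]
      congr 1
      omega
    rw [hslice, foldl_ite_false
      (fun fruit => (PySem.List.count ((discount.drop k).take 10) fruit : Int)
        = (needD want number).getD fruit 0) want true, Bool.true_and]
    rw [Bool.eq_iff_iff]
    simp only [okW, List.all_eq_true, decide_eq_true_eq, beq_iff_eq, PySem.List.count_eq, iff_true]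
    exact ⟨fun h f hf => h f ((mem_keys_needD want number hlen f).mp hf),
           fun h f hf => h f ((mem_keys_needD want number hlen f).mpr hf)⟩
  · rw [PySem.List.pyRange_one_eq_nil (by omega)]
    have : discount.length - 9 = 0 := by omega
    rw [this]
    simp

-- ===== VERDICT (by name: the statement is the Claim_ definition above) =====
theorem solution_spec : Claim_equal_solution := by
  intro want number discount _ hpre
  have hlen : want.length ≤ number.length := hpre
  show solution want number discount = solution_alt want number discount
  rw [a_eq want number discount hlen, alt_eq]
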